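-- pv_equiv track=rewrite | github.com/kurtrm/code-katas | src/string_pyramid.py | watch_pyramid_from_the_side
-- ===== SOURCE A (Python) =====
-- def watch_pyramid_from_the_side(characters):
--     """View the character pyramid from the side."""
--     if characters is None:
--         return characters
--     counter = 1
--     listy = []
--     for character in characters[::-1]:
--         listy.append(character * counter)
--         counter += 2
--     stringy = ''
--     spaces = ((counter) // 2) - 1
--     for character in listy:
--         if len(character) < counter - 2:
--             stringy += '{0}{1}{0}\n'.format(' ' * spaces, character)
--             spaces -= 1
--         else:
--             stringy += character
--     return stringy
-- ===== SOURCE B (Python) =====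
-- def watch_pyramid_from_the_side(characters):
--     """View the character pyramid from the side."""
--     if characters is None:
--         return characters
--     n = len(characters)
--     body = characters[::-1]
--     # column j of the picture: |j - center| leading spaces, then the rest of body
--     cols = [' ' * abs(j - (n - 1)) + body[abs(j - (n - 1)):] for j in range(2 * n - 1)]
--     return '\n'.join(map(''.join, zip(*cols)))
-- ===== Notes on version B (the rewrite author's own statement) =====
-- stated objective: alternative
-- what changed: B builds the picture column-wise - each of the 2n-1 columns is |j-center| leading spaces followed by the corresponding suffix of the reversed string - and transposes the columns into rows with zip, instead of A's row-by-row accumulation with counter/spaces state and a special case for the widest line.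
import Mathlib
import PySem

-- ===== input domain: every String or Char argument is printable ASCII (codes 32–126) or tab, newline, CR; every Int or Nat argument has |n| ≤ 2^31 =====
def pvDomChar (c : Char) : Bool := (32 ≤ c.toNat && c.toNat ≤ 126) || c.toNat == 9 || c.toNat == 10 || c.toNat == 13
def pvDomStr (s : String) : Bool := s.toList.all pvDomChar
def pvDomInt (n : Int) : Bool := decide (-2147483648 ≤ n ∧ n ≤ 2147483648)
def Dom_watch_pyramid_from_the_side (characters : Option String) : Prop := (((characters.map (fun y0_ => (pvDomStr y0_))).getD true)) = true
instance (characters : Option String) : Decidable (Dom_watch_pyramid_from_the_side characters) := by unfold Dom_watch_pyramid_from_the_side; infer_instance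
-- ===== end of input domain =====

-- B builds the picture column-wise (each column = |j-center| spaces ++ a suffix of the reversed string) and transposes with zip, instead of A's row accumulators (objective: alternative).

-- ===== PORT A =====
-- literal port of A: first loop over characters[::-1] building (counter, listy),
-- second loop over listy building (spaces, stringy).
def watch_pyramid_from_the_side (characters : Option String) : Option String :=
  match characters with
  | none => none
  | some s =>
    let cs := s.toList
    let p1 := cs.reverse.foldl
      (fun (st : Int × List (List Char)) c =>
        (st.1 + 2, st.2 ++ [List.replicate st.1.toNat c]))  -- character * counter
      (1, [])
    let counter : Int := p1.1
    let listy := p1.2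
    let spaces0 : Int := PySem.Int.floordiv counter 2 - 1
    let p2 := listy.foldl
      (fun (st : Int × List Char) row =>
        if (row.length : Int) < counter - 2 then
          (st.1 - 1, st.2 ++ List.replicate st.1.toNat ' ' ++ row
                       ++ List.replicate st.1.toNat ' ' ++ ['\n'])
        else
          (st.1, st.2 ++ row))
      (spaces0, [])
    some (String.mk p2.2)

-- ===== PORT B =====
-- zip(*cols) yields exactly min(column length) rows; ported with that count as a
-- structural fuel: each step emits the column heads and recurses on the tails (exact)
def pvZipGo : Nat → List (List Char) → List (List Char)
  | 0, _ => []
  | m + 1, cols => cols.map (fun col => col.headD ' ') :: pvZipGo m (cols.map List.tail)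

def pvZipRows (cols : List (List Char)) : List (List Char) :=
  match (cols.map List.length).min? with
  | none => []
  | some m => pvZipGo m cols

-- port of Source B: abs(j - (n-1)) via Int.natAbs; ' '*d ++ body[d:]; '\n'.join as intercalate
def watch_pyramid_from_the_side_alt (characters : Option String) : Option String :=
  match characters with
  | none => none
  | some s =>
    let cs := s.toList
    let n := cs.length
    let body := cs.reverse
    let cols := (List.range (2 * n - 1)).map (fun (j : Nat) =>
      List.replicate (((j : Int) - ((n : Int) - 1)).natAbs) ' '
        ++ body.drop (((j : Int) - ((n : Int) - 1)).natAbs))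
    some (String.mk (List.intercalate ['\n'] (pvZipRows cols)))

-- ===== PRECONDITION & SPEC =====
def Spec_watch_pyramid_from_the_side (characters : Option String) (out : Option String) : Prop := out = watch_pyramid_from_the_side_alt characters
instance (characters : Option String) (out : Option String) : Decidable (Spec_watch_pyramid_from_the_side characters out) := by unfold Spec_watch_pyramid_from_the_side; infer_instance

-- ===== CLAIM (what is proved, stated in full; the proofs are below) =====
def Claim_equal_watch_pyramid_from_the_side : Prop := ∀ (characters : Option String), Dom_watch_pyramid_from_the_side characters → Spec_watch_pyramid_from_the_side characters (watch_pyramid_from_the_side characters)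

-- ===== LEMMAS AND PROOFS =====

-- row i of A's listy (over the reversed character list r)
def pvRow (r : List Char) (i : ℕ) : List Char := List.replicate (2 * i + 1) (r.getD i ' ')

-- the piece of A's final string contributed by row i (n rows total)
def pvPiece (r : List Char) (n i : ℕ) : List Char :=
  if i + 1 < n then
    List.replicate (n - 1 - i) ' ' ++ pvRow r i ++ List.replicate (n - 1 - i) ' ' ++ ['\n']
  else pvRow r i

-- the padded row i (over the reversed list r; pad is empty at i = n-1)
def pvRowB (r : List Char) (n i : ℕ) : List Char :=
  List.replicate (n - 1 - i) ' ' ++ pvRow r i ++ List.replicate (n - 1 - i) ' '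

-- A's first loop, closed form
lemma pvFold1 (r : List Char) : ∀ (k : ℕ) (acc : List (List Char)),
    r.foldl (fun (st : Int × List (List Char)) c =>
        (st.1 + 2, st.2 ++ [List.replicate st.1.toNat c])) ((2 * k + 1 : Int), acc)
    = ((2 * (k + r.length) + 1 : Int),
        acc ++ (List.range r.length).map (fun i => List.replicate (2 * (k + i) + 1) (r.getD i ' '))) := by
  induction r with
  | nil => intro k acc; simp
  | cons c r ih =>
    intro k acc
    have h1 : ((2 * (k:ℤ) + 1) + 2) = (2 * ((k + 1 : ℕ) : ℤ) + 1) := by push_cast; ring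
    have h2 : ((2 * (k:ℤ) + 1)).toNat = 2 * k + 1 := by omega
    simp only [List.foldl_cons, h1, h2]
    rw [ih (k + 1)]
    simp only [Prod.mk.injEq]
    refine ⟨by push_cast [List.length_cons]; ring, ?_⟩
    simp only [List.length_cons]
    have htail : List.map (fun i => List.replicate (2 * (k + 1 + i) + 1) (r.getD i ' ')) (List.range r.length)
        = List.map ((fun i => List.replicate (2 * (k + i) + 1) ((c :: r).getD i ' ')) ∘ Nat.succ) (List.range r.length) := by
      apply List.map_congr_left
      intro i _
      simp only [Function.comp, List.getD_eq_getElem?_getD, List.getElem?_cons_succ]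
      congr 1
      omega
    rw [List.range_succ_eq_map, List.map_cons, List.map_map, List.append_assoc, List.singleton_append, htail]
    simp [List.getD]

-- A's second loop, closed form over the suffix of rows starting at index m
lemma pvFold2 (r : List Char) (n : ℕ) : ∀ (k m : ℕ) (acc : List Char), m + k = n →
    ((List.range' m k).map (pvRow r)).foldl
      (fun (st : Int × List Char) row =>
        if (row.length : Int) < (2 * n + 1 : Int) - 2 then
          (st.1 - 1, st.2 ++ List.replicate st.1.toNat ' ' ++ row
                       ++ List.replicate st.1.toNat ' ' ++ ['\n'])
        else (st.1, st.2 ++ row))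
      ((n : Int) - 1 - m, acc)
    = ((if k = 0 then (n : Int) - 1 - m else 0),
        acc ++ ((List.range' m k).map (pvPiece r n)).flatten) := by
  intro k
  induction k with
  | zero => intro m acc h; simp
  | succ k ih =>
    intro m acc h
    rw [List.range'_succ]
    simp only [List.map_cons, List.foldl_cons]
    have hrowlen : (pvRow r m).length = 2 * m + 1 := by simp [pvRow]
    by_cases hm : m + 1 < n
    · have hcond : ((pvRow r m).length : Int) < (2 * n + 1 : Int) - 2 := by
        rw [hrowlen]; push_cast; omega
      have htn : ((n : Int) - 1 - m).toNat = n - 1 - m := by omega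
      rw [if_pos hcond]
      have hstep : ((n : Int) - 1 - m) - 1 = (n : Int) - 1 - (m + 1 : ℕ) := by push_cast; ring
      rw [htn, hstep, ih (m + 1) _ (by omega)]
      have hk : k ≠ 0 := by omega
      simp [hk, pvPiece, hm]
    · -- m + 1 = n: last (widest) row, no padding, and k = 0
      have hk0 : k = 0 := by omega
      have hcond : ¬ (((pvRow r m).length : Int) < (2 * n + 1 : Int) - 2) := by
        rw [hrowlen]; push_cast; omega
      rw [if_neg hcond]
      subst hk0
      simp only [List.range'_zero, List.map_nil, List.foldl_nil, List.flatten_cons,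
        List.flatten_nil, List.append_nil, Prod.mk.injEq]
      refine ⟨by omega, by simp [pvPiece, hm]⟩

-- joining the padded rows with '\n' yields exactly A's concatenated pieces
lemma pvJoin (r : List Char) (n : ℕ) : ∀ (k m : ℕ), m + k = n →
    List.intercalate ['\n'] ((List.range' m k).map (pvRowB r n))
    = ((List.range' m k).map (pvPiece r n)).flatten := by
  intro k
  induction k with
  | zero => intro m h; simp [List.intercalate]
  | succ k ih =>
    intro m h
    rw [List.range'_succ]
    cases k with
    | zero =>
      have hm : ¬ (m + 1 < n) := by omega
      have hp : n - 1 - m = 0 := by omega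
      simp [List.intercalate, pvRowB, pvPiece, hm, hp]
    | succ k' =>
      have hm : m + 1 < n := by omega
      simp only [List.map_cons, List.intercalate]
      rw [List.range'_succ]
      simp only [List.map_cons, List.intersperse_cons₂, List.flatten_cons]
      have := ih (m + 1) (by omega)
      rw [List.range'_succ] at this
      simp only [List.map_cons, List.intercalate] at this
      rw [this]
      simp [pvPiece, hm, pvRowB]

-- a cell of column j at depth r: space above the diagonal, the row's character below it
lemma pvColGet (body : List Char) (n j r : ℕ) :
    (List.replicate (((j : Int) - ((n : Int) - 1)).natAbs) ' '
        ++ body.drop (((j : Int) - ((n : Int) - 1)).natAbs)).getD r ' '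
    = if (((j : Int) - ((n : Int) - 1)).natAbs) ≤ r then body.getD r ' ' else ' ' := by
  set d := (((j : Int) - ((n : Int) - 1)).natAbs) with hd
  by_cases hdr : d ≤ r
  · rw [if_pos hdr]
    simp only [List.getD_eq_getElem?_getD]
    rw [List.getElem?_append_right (by simpa using hdr), List.length_replicate, List.getElem?_drop,
        show d + (r - d) = r by omega]
  · rw [if_neg hdr]
    simp only [List.getD_eq_getElem?_getD]
    rw [List.getElem?_append_left (by simp; omega), List.getElem?_replicate, if_pos (by omega)]
    rfl

-- row r of the transposed columns is the padded row r
lemma pvRowOfCols (body : List Char) (n r : ℕ) (hr : r < n) (hb : body.length = n) :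
    (List.range (2 * n - 1)).map (fun (j : ℕ) =>
      (List.replicate (((j : Int) - ((n : Int) - 1)).natAbs) ' '
        ++ body.drop (((j : Int) - ((n : Int) - 1)).natAbs)).getD r ' ')
    = pvRowB body n r := by
  have h1 := List.range'_append_1 (s := 0) (m := n - 1 - r) (n := 2 * r + 1)
  have h2 := List.range'_append_1 (s := 0) (m := (n - 1 - r) + (2 * r + 1)) (n := n - 1 - r)
  simp only [Nat.zero_add] at h1 h2
  have hsplit : List.range' 0 (n - 1 - r) ++ List.range' (n - 1 - r) (2 * r + 1)
      ++ List.range' (n + r) (n - 1 - r) = List.range' 0 (2 * n - 1) := by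
    rw [show n + r = (n - 1 - r) + (2 * r + 1) from by omega, h1, h2]
    congr 1
    omega
  rw [List.range_eq_range', ← hsplit, List.map_append, List.map_append]
  unfold pvRowB pvRow
  congr 1
  congr 1
  · -- left pad: j < n - 1 - r, the cell is above the diagonal
    rw [show List.replicate (n - 1 - r) (' ' : Char)
          = List.replicate (List.range' 0 (n - 1 - r)).length ' ' by simp,
        ← List.map_const']
    apply List.map_congr_left
    intro j hj
    have hj' : j < n - 1 - r := by have := List.mem_range'.mp hj; omega
    rw [pvColGet body n j r, if_neg (by omega)]
  · -- middle: the 2r+1 character cells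
    rw [show List.replicate (2 * r + 1) (body.getD r ' ')
          = List.replicate (List.range' (n - 1 - r) (2 * r + 1)).length (body.getD r ' ') by simp,
        ← List.map_const']
    apply List.map_congr_left
    intro j hj
    have hj' : n - 1 - r ≤ j ∧ j < n + r := by have := List.mem_range'.mp hj; omega
    rw [pvColGet body n j r, if_pos (by omega)]
  · -- right pad
    rw [show List.replicate (n - 1 - r) (' ' : Char)
          = List.replicate (List.range' (n + r) (n - 1 - r)).length ' ' by simp,
        ← List.map_const']
    apply List.map_congr_left
    intro j hj
    have hj' : n + r ≤ j := by have := List.mem_range'.mp hj; omega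
    rw [pvColGet body n j r, if_neg (by omega)]

-- the minimum of a nonempty constant list
lemma pvMinConst (m : ℕ) : ∀ (l : List ℕ), l ≠ [] → (∀ x ∈ l, x = m) → l.min? = some m := by
  intro l hne hall
  cases l with
  | nil => exact absurd rfl hne
  | cons a t =>
    have ha : a = m := hall a (by simp)
    subst ha
    rw [List.min?_cons']
    congr 1
    induction t with
    | nil => rfl
    | cons b t iht =>
      have hb : b = a := hall b (by simp)
      subst hb
      simp only [List.foldl_cons, Nat.min_self]
      exact iht (by simp) (by intro x hx; exact hall x (by simp [hx]))

-- the fueled transpose of equal-length columns is the list of rows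
lemma pvZipGo_eq : ∀ (m : ℕ) (cols : List (List Char)), (∀ col ∈ cols, col.length = m) →
    pvZipGo m cols = (List.range m).map (fun r => cols.map (fun col => col.getD r ' ')) := by
  intro m
  induction m with
  | zero => intro cols _; rfl
  | succ m ih =>
    intro cols hlen
    rw [pvZipGo, ih (cols.map List.tail)
          (by intro col hcol
              obtain ⟨c, hc, hrfl⟩ := List.mem_map.mp hcol
              have := hlen c hc
              subst hrfl
              cases c with
              | nil => simp at this
              | cons x xs => simpa using this),
        List.range_succ_eq_map, List.map_cons, List.map_map]
    congr 1
    · apply List.map_congr_left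
      intro col _
      cases col <;> rfl
    · apply List.map_congr_left
      intro r _
      simp only [Function.comp, List.map_map]
      apply List.map_congr_left
      intro col _
      cases col <;> rfl

-- ===== VERDICT (by name: the statement is the Claim_ definition above) =====
theorem watch_pyramid_from_the_side_spec : Claim_equal_watch_pyramid_from_the_side := by
  intro characters _
  unfold Spec_watch_pyramid_from_the_side watch_pyramid_from_the_side watch_pyramid_from_the_side_alt
  cases characters with
  | none => rfl
  | some s =>
    simp only
    set cs := s.toList with hcs
    set r := cs.reverse with hr
    set n := cs.length with hn
    have hrn : r.length = n := by simp [hr, hn]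
    -- first loop
    have h1 := pvFold1 r 0 []
    simp only [Nat.cast_zero, zero_add, List.nil_append, hrn] at h1
    norm_num at h1
    rw [h1]
    -- listy = map (pvRow r) (range n)
    have hlisty : (List.range n).map (fun i => List.replicate (2 * i + 1) (r[i]?.getD ' '))
        = (List.range' 0 n).map (pvRow r) := by
      rw [List.range_eq_range']
      apply List.map_congr_left
      intro i _
      simp [pvRow, List.getD_eq_getElem?_getD]
    -- spaces0
    have hsp : PySem.Int.floordiv (2 * (n:Int) + 1) 2 - 1 = (n : Int) - 1 - (0:ℕ) := by
      have : PySem.Int.floordiv (2 * (n:Int) + 1) 2 = n := by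
        rw [PySem.Int.floordiv_eq_ediv_of_pos (by norm_num)]
        omega
      rw [this]; simp
    rw [hlisty, hsp, pvFold2 r n n 0 [] (by omega)]
    -- B side
    congr 1
    by_cases hn0 : n = 0
    · rw [hn0]
      simp [pvZipRows, List.intercalate]
    · set cols := (List.range (2 * n - 1)).map (fun (j : ℕ) =>
        List.replicate (((j : Int) - ((n : Int) - 1)).natAbs) ' '
          ++ r.drop (((j : Int) - ((n : Int) - 1)).natAbs)) with hcolsdef
      have hcols : ∀ col ∈ cols, col.length = n := by
        intro col hcol
        obtain ⟨j, hj, hrfl⟩ := List.mem_map.mp hcol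
        have hj' : j < 2 * n - 1 := List.mem_range.mp hj
        subst hrfl
        simp only [List.length_append, List.length_replicate, List.length_drop, hrn]
        omega
      have hne : cols ≠ [] := by
        apply List.ne_nil_of_length_pos
        rw [hcolsdef, List.length_map, List.length_range]
        omega
      have hmin : (cols.map List.length).min? = some n := by
        apply pvMinConst
        · simpa using hne
        · intro x hx
          obtain ⟨col, hcol, hrfl⟩ := List.mem_map.mp hx
          rw [← hrfl]
          exact hcols col hcol
      rw [show pvZipRows cols = pvZipGo n cols from by rw [pvZipRows, hmin],
          pvZipGo_eq n cols hcols]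
      have hrows : (List.range n).map (fun r' => cols.map (fun col => col.getD r' ' '))
          = (List.range' 0 n).map (pvRowB r n) := by
        rw [show List.range n = List.range' 0 n from List.range_eq_range']
        apply List.map_congr_left
        intro i hi
        have hi' : i < n := by have := List.mem_range'.mp hi; omega
        rw [hcolsdef, List.map_map]
        exact pvRowOfCols r n i hi' hrn
      rw [hrows, pvJoin r n n 0 (by omega)]
      simp
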